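-- pv_equiv track=rewrite | github.com/communitiesuk/funding-service-design-fund-store | scripts/read_forms.py | strip_leading_numbers
-- ===== SOURCE A (Python) =====
-- def strip_leading_numbers(text):
--     result = text
--     for char in text:
--         if char == " ":
--             break
--         if char.isdigit() or char == ".":
--             result = result[1:]  # strip this character
--     return result.strip()
-- ===== SOURCE B (Python) =====
-- def strip_leading_numbers(text):
--     cut = text.find(" ")
--     prefix = text if cut < 0 else text[:cut]
--     k = sum(1 for c in prefix if c.isdigit() or c == ".")
--     return text[k:].strip()
-- ===== Notes on version B (the rewrite author's own statement) =====
-- stated objective: simpler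
-- what changed: B computes the cut position and the count of digit/dot characters in the pre-space prefix up front and slices once, instead of A's loop that re-slices the accumulator string one character at a time.
import Mathlib
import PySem

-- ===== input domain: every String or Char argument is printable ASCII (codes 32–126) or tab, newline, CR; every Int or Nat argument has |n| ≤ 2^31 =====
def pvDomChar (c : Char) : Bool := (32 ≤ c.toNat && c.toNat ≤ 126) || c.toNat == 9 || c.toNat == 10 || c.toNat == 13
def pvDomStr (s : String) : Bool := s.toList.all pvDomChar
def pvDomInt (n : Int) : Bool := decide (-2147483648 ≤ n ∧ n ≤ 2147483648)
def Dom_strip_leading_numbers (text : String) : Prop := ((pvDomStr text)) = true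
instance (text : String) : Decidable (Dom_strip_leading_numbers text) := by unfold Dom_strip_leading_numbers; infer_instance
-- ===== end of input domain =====

-- B computes the cut position and digit/dot count up front and slices once, instead of A's
-- loop that re-slices the accumulator one character at a time (objective: simpler).

-- ===== PORT A =====
-- the for-loop with break: iterate over the characters of text, keeping 'result'
def stripLoopA : List Char → List Char → List Char
  | [], result => result
  | c :: rest, result =>
    if c = ' ' then result
    else if PySem.Chars.isdigit c || c == '.' then
      stripLoopA rest (PySem.List.slice result (some 1) none)   -- result = result[1:]
    else stripLoopA rest result

def strip_leading_numbers (text : String) : String :=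
  String.ofList (PySem.Chars.strip (stripLoopA text.toList text.toList))

-- ===== PORT B =====
def strip_leading_numbers_alt (text : String) : String :=
  let cs := text.toList
  let cut := PySem.Chars.find cs [' ']
  let pre := if cut < 0 then cs else PySem.List.slice cs none (some cut)
  let k : Nat := pre.countP (fun c => PySem.Chars.isdigit c || c == '.')
  String.ofList (PySem.Chars.strip (PySem.List.slice cs (some (k : Int)) none))

-- ===== PRECONDITION & SPEC =====
def Spec_strip_leading_numbers (text : String) (out : String) : Prop := out = strip_leading_numbers_alt text
instance (text : String) (out : String) : Decidable (Spec_strip_leading_numbers text out) := by unfold Spec_strip_leading_numbers; infer_instance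

-- ===== CLAIM (what is proved, stated in full; the proofs are below) =====
def Claim_equal_strip_leading_numbers : Prop := ∀ (text : String), Dom_strip_leading_numbers text → Spec_strip_leading_numbers text (strip_leading_numbers text)

-- ===== LEMMAS AND PROOFS =====

-- a one-char list is a prefix iff it is the head
theorem singleton_prefix_iff (l : List Char) : [' '] <+: l ↔ l.head? = some ' ' := by
  constructor
  · rintro ⟨t, rfl⟩; rfl
  · intro h; cases l with
    | nil => simp at h
    | cons a t => simp at h; exact ⟨t, by simp [h]⟩

-- A's loop drops one leading char of 'result' per digit/dot char before the first space of 'chars'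
theorem stripLoopA_eq_drop (chars result : List Char) :
    stripLoopA chars result
      = result.drop ((chars.takeWhile (fun c => !(c == ' '))).countP
          (fun c => PySem.Chars.isdigit c || c == '.')) := by
  induction chars generalizing result with
  | nil => simp [stripLoopA]
  | cons c rest ih =>
    by_cases hsp : c = ' '
    · simp [stripLoopA, hsp]
    · simp only [stripLoopA, if_neg hsp, List.takeWhile_cons,
        show (!(c == ' ')) = true by simp [hsp]]
      by_cases hd : (PySem.Chars.isdigit c || c == '.') = true
      · rw [if_pos hd, ih, PySem.List.slice_from_one]
        simp [hd, List.drop_tail]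
      · rw [if_neg hd, ih]
        simp [hd]

-- take n is takeWhile (≠ ' ') when position n holds the first space
theorem takeWhile_eq_take_of_first_space (cs : List Char) (n : Nat)
    (h1 : ∀ i, i < n → ∀ hl : i < cs.length, cs[i] ≠ ' ') (h2 : cs[n]? = some ' ') :
    cs.takeWhile (fun c => !(c == ' ')) = cs.take n := by
  induction cs generalizing n with
  | nil => simp at h2
  | cons c rest ih =>
    cases n with
    | zero =>
      simp at h2
      simp [h2]
    | succ m =>
      have hc : c ≠ ' ' := h1 0 (Nat.succ_pos m) (by simp)
      have hr := ih m (fun i hi hl => by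
            have := h1 (i+1) (by omega) (by simpa using Nat.succ_lt_succ hl)
            simpa using this) (by simpa using h2)
      simp [hc, hr]

-- B's prefix (up to the first space, or all of cs) is exactly takeWhile (≠ ' ')
theorem pre_eq_takeWhile (cs : List Char) :
    (if PySem.Chars.find cs [' '] < 0 then cs
     else PySem.List.slice cs none (some (PySem.Chars.find cs [' '])))
      = cs.takeWhile (fun c => !(c == ' ')) := by
  by_cases h : PySem.Chars.find cs [' '] < 0
  · rw [if_pos h]
    have hno : ¬ ([' '] <:+: cs) := by
      rw [← PySem.Chars.find_eq_neg_one_iff]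
      have := PySem.Chars.neg_one_le_find cs [' ']
      omega
    have hmem : ' ' ∉ cs := fun hm => hno ((List.singleton_infix_iff ' ' cs).mpr hm)
    symm
    rw [List.takeWhile_eq_self_iff]
    intro c hc
    simp only [Bool.not_eq_true', beq_eq_false_iff_ne, ne_eq]
    rintro rfl; exact hmem hc
  · rw [if_neg h]
    have h0 : 0 ≤ PySem.Chars.find cs [' '] := by omega
    obtain ⟨hpre, hmin⟩ := PySem.Chars.find_spec (s := cs) (sub := [' ']) h0
    rw [PySem.List.slice_to cs h0]
    rw [takeWhile_eq_take_of_first_space cs (PySem.Chars.find cs [' ']).toNat]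
    · intro i hi hl hsp
      exact hmin i hi ((singleton_prefix_iff _).mpr (by rw [List.head?_drop, List.getElem?_eq_getElem hl, hsp]))
    · rw [← List.head?_drop]
      exact (singleton_prefix_iff _).mp hpre

-- ===== VERDICT (by name: the statement is the Claim_ definition above) =====
theorem strip_leading_numbers_spec : Claim_equal_strip_leading_numbers := by
  intro text _
  show strip_leading_numbers text = strip_leading_numbers_alt text
  unfold strip_leading_numbers strip_leading_numbers_alt
  simp only []
  rw [stripLoopA_eq_drop, PySem.List.slice_from_natCast, pre_eq_takeWhile]
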